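-- pv_equiv track=rewrite | github.com/Victor-Smirnoff/my_codesignal_solutions_Python | The Core/Make Array Consecutive 2.py | solution
-- ===== SOURCE A (Python) =====
-- def solution(statues):
--     statues.sort()
--     count = 0
--     for i in range(1, len(statues)):
--         if statues[i] - 1 == statues[i - 1]:
--             continue
--         else:
--             count += (statues[i] - 1 - statues[i - 1])
--
--     return count
-- ===== SOURCE B (Python) =====
-- def solution(statues):
--     # Equivalence is about the return value only: A sorts its argument in
--     # place, B does not touch it.
--     if not statues:
--         return 0
--     return max(statues) - min(statues) + 1 - len(statues)
-- ===== Notes on version B (the rewrite author's own statement) =====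
-- stated objective: faster
-- what changed: Replaced sort-then-scan-adjacent-gaps by the closed form max-min+1-len computed in one pass (the gap sums telescope), with empty list giving 0.
import Mathlib
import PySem

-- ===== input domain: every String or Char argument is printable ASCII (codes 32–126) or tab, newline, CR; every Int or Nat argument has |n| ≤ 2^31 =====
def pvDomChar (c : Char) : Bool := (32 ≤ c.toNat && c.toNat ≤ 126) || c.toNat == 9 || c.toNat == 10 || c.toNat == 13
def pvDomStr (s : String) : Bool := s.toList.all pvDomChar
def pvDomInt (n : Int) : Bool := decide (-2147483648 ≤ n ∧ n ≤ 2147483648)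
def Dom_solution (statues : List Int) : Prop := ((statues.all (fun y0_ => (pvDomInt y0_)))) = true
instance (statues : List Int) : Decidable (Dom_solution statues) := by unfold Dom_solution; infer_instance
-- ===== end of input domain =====

-- B replaces A's sort-then-sum-of-adjacent-gaps by the closed form
-- max - min + 1 - len (empty list → 0); faster (O(n) vs O(n log n)).
-- Equivalence is about the return value only: A sorts its argument in place, B does not.

-- ===== PORT A =====
def solution (statues : List Int) : Int :=
  let s := PySem.List.sorted statues (fun x => x) false
  (PySem.List.pyRange 1 (s.length : Int) 1).foldl
    (fun count i =>
      if PySem.List.pyGetD s i 0 - 1 = PySem.List.pyGetD s (i - 1) 0 then count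
      else count + (PySem.List.pyGetD s i 0 - 1 - PySem.List.pyGetD s (i - 1) 0)) 0

-- ===== PORT B =====
def solution_alt (statues : List Int) : Int :=
  if statues = [] then 0
  else
    (PySem.List.max? statues (fun x => x)).getD 0
      - (PySem.List.min? statues (fun x => x)).getD 0
      + 1 - (statues.length : Int)

-- ===== PRECONDITION & SPEC =====
def Spec_solution (statues : List Int) (out : Int) : Prop := out = solution_alt statues
instance (statues : List Int) (out : Int) : Decidable (Spec_solution statues out) := by unfold Spec_solution; infer_instance

-- ===== CLAIM (what is proved, stated in full; the proofs are below) =====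
def Claim_equal_solution : Prop := ∀ (statues : List Int), Dom_solution statues → Spec_solution statues (solution statues)

-- ===== LEMMAS AND PROOFS =====

-- Each loop step adds s[i] - 1 - s[i-1] (the 'continue' branch adds 0 anyway).
theorem solution_step (s : List Int) (acc i : Int) :
    (if PySem.List.pyGetD s i 0 - 1 = PySem.List.pyGetD s (i - 1) 0 then acc
     else acc + (PySem.List.pyGetD s i 0 - 1 - PySem.List.pyGetD s (i - 1) 0))
      = acc + (PySem.List.pyGetD s i 0 - 1 - PySem.List.pyGetD s (i - 1) 0) := by
  split_ifs with h
  · omega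
  · rfl

-- The gap sum telescopes: fold over range(1, n) gives c + s[n-1] - s[0] - (n-1).
theorem solution_telescope (s : List Int) :
    ∀ (n : Nat), 1 ≤ n → n ≤ s.length → ∀ (c : Int),
    (PySem.List.pyRange 1 (n : Int) 1).foldl
      (fun count i =>
        if PySem.List.pyGetD s i 0 - 1 = PySem.List.pyGetD s (i - 1) 0 then count
        else count + (PySem.List.pyGetD s i 0 - 1 - PySem.List.pyGetD s (i - 1) 0)) c
      = c + (s.getD (n - 1) 0 - s.getD 0 0) - ((n : Int) - 1) := by
  intro n
  induction n with
  | zero => intro h; omega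
  | succ m ih =>
    intro _ hle c
    by_cases hm : 1 ≤ m
    · have h1 : ((m + 1 : Nat) : Int) = (m : Int) + 1 := by push_cast; ring
      rw [h1, PySem.List.pyRange_one_succ_right (by exact_mod_cast hm),
          List.foldl_append, List.foldl_cons, List.foldl_nil, solution_step,
          ih hm (by omega) c]
      have h2 : ((m : Int) - 1) = ((m - 1 : Nat) : Int) := by omega
      rw [h2, PySem.List.pyGetD_natCast, PySem.List.pyGetD_natCast]
      simp only [Nat.add_sub_cancel]
      omega
    · have hm0 : m = 0 := by omega
      subst hm0
      simp [PySem.List.pyRange_one_eq_nil]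

-- In the sorted list, the first element is the minimum value of the input
-- and the last element is the maximum value of the input.
theorem sorted_getD_extremal (statues : List Int) (h : statues ≠ []) :
    (PySem.List.sorted statues (fun x => x) false).getD 0 0
        = (PySem.List.min? statues (fun x => x)).getD 0
    ∧ (PySem.List.sorted statues (fun x => x) false).getD
        ((PySem.List.sorted statues (fun x => x) false).length - 1) 0
        = (PySem.List.max? statues (fun x => x)).getD 0 := by
  set s := PySem.List.sorted statues (fun x => x) false with hs
  have hperm : s.Perm statues := PySem.List.sorted_perm statues _ _
  have hpw : s.Pairwise (fun a b => a ≤ b) := PySem.List.sorted_pairwise statues _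
  have hlen : s.length = statues.length := hperm.length_eq
  have hsne : s ≠ [] := by
    intro hnil
    apply h
    have := hperm.length_eq
    rw [hnil] at this
    exact List.length_eq_zero_iff.mp this.symm
  have hslen : 0 < s.length := List.length_pos_iff.mpr hsne
  -- min side
  obtain ⟨mn, hmn⟩ : ∃ mn, PySem.List.min? statues (fun x => x) = some mn := by
    cases hmin : PySem.List.min? statues (fun x => x) with
    | none => exact absurd ((PySem.List.min?_eq_none_iff _ _).mp hmin) h
    | some v => exact ⟨v, rfl⟩
  obtain ⟨mx, hmx⟩ : ∃ mx, PySem.List.max? statues (fun x => x) = some mx := by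
    cases hmax : PySem.List.max? statues (fun x => x) with
    | none => exact absurd ((PySem.List.max?_eq_none_iff _ _).mp hmax) h
    | some v => exact ⟨v, rfl⟩
  have hmn_mem : mn ∈ s := hperm.mem_iff.mpr (PySem.List.min?_mem hmn)
  have hmx_mem : mx ∈ s := hperm.mem_iff.mpr (PySem.List.max?_mem hmx)
  have hmn_min : ∀ y ∈ s, mn ≤ y := fun y hy =>
    PySem.List.min?_isMin hmn y (hperm.mem_iff.mp hy)
  have hmx_max : ∀ y ∈ s, y ≤ mx := fun y hy =>
    PySem.List.max?_isMax hmx y (hperm.mem_iff.mp hy)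
  have hget := List.pairwise_iff_getElem.mp hpw
  constructor
  · rw [hmn, Option.getD_some]
    have h0 : s.getD 0 0 = s[0] := List.getD_eq_getElem s 0 hslen
    rw [h0]
    have h1 : mn ≤ s[0] := hmn_min _ (List.getElem_mem hslen)
    obtain ⟨i, hi, hie⟩ := List.getElem_of_mem hmn_mem
    have h2 : s[0] ≤ mn := by
      rcases Nat.eq_zero_or_pos i with h0i | h0i
      · subst h0i; omega
      · have := hget 0 i hslen hi h0i
        omega
    omega
  · rw [hmx, Option.getD_some]
    have hl : s.length - 1 < s.length := by omega
    have h0 : s.getD (s.length - 1) 0 = s[s.length - 1] := List.getD_eq_getElem s _ hl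
    rw [h0]
    have h1 : s[s.length - 1] ≤ mx := hmx_max _ (List.getElem_mem hl)
    obtain ⟨i, hi, hie⟩ := List.getElem_of_mem hmx_mem
    have h2 : mx ≤ s[s.length - 1] := by
      rcases Nat.lt_or_ge i (s.length - 1) with hlt | hge
      · have := hget i (s.length - 1) hi hl hlt
        omega
      · have : i = s.length - 1 := by omega
        subst this; omega
    omega

-- ===== VERDICT (by name: the statement is the Claim_ definition above) =====
theorem solution_spec : Claim_equal_solution := by
  intro statues _
  unfold Spec_solution solution solution_alt
  by_cases h : statues = []
  · subst h; decide
  · simp only [if_neg h]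
    set s := PySem.List.sorted statues (fun x => x) false with hs
    have hlen : s.length = statues.length :=
      (PySem.List.sorted_perm statues _ _).length_eq
    have hslen : 1 ≤ s.length := by
      have : statues.length ≠ 0 := fun hh => h (List.length_eq_zero_iff.mp hh)
      omega
    rw [solution_telescope s s.length hslen le_rfl 0]
    obtain ⟨hmin, hmax⟩ := sorted_getD_extremal statues h
    rw [← hs] at hmin hmax
    rw [hmin, hmax, hlen]
    omega
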